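-- pv_equiv track=rewrite | github.com/harvard-lil/LeftToRight | app.py | umlauted
-- ===== SOURCE A (Python) =====
-- def umlauted(name):
--     backwards = " ".join(name.lower()[::-1].split()[::-1])
--     vowels = {'a': 'ä', 'e': 'ë', 'i': 'ï', 'o': 'ö', 'u': 'ü', 'y': 'ÿ'}
--     output = ''
--     translate = True
--     for char in backwards:
--         if translate and char in vowels:
--             output += vowels[char]
--             translate = False
--         elif char == ' ':
--             output += ' '
--             translate = True
--         else:
--             output += char
--     return output.title()
-- ===== SOURCE B (Python) =====
-- VOWELS = {'a': 'ä', 'e': 'ë', 'i': 'ï', 'o': 'ö', 'u': 'ü', 'y': 'ÿ'}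
--
-- def _um_last(cs):
--     # umlaut the LAST vowel of the word (= the first vowel once the word is reversed):
--     # walk forward; a character is kept as long as a vowel still lies further on
--     out = []
--     i, n = 0, len(cs)
--     while i < n:
--         c = cs[i]
--         if any(cs[j] in VOWELS for j in range(i + 1, n)):
--             out.append(c)
--             i += 1
--         else:
--             return out + [VOWELS.get(c, c)] + list(cs[i + 1:])
--     return out
--
-- def umlauted(name):
--     pieces = [''.join(reversed(_um_last(w))) for w in name.lower().split()]
--     return ' '.join(pieces).title()
-- ===== Notes on version B (the rewrite author's own statement) =====
-- stated objective: alternative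
-- what changed: A rebuilds the whole string (reverse, split, reverse word list, join) and then umlauts in one flat left-to-right pass driven by a translate flag reset at spaces; B never reverses the string: it maps over name.lower().split() directly, umlauting each word's LAST vowel with a lookahead scan that keeps a character while a vowel still lies further on, reverses the word afterwards, then joins and titles.
import Mathlib
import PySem

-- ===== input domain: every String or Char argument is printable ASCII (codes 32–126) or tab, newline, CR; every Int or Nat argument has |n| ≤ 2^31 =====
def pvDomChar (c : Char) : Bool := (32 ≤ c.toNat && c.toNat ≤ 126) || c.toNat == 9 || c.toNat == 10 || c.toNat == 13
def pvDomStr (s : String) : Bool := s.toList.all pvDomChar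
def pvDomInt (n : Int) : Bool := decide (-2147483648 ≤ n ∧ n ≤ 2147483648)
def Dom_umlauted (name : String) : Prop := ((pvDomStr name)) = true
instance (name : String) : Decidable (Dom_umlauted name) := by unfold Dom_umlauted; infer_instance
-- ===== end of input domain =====

-- B avoids A's reverse/flat-pass machinery: it maps over the words of name.lower().split(),
-- umlauts each word's LAST vowel by recursion with a lookahead, reverses the word afterwards,
-- then joins and titles (objective: alternative decomposition, same practical cost).

-- str.title(), which both Pythons apply last. PySem has no title, so it is hand-ported:
-- a cased character is uppercased when the previous character is not cased, lowercased
-- otherwise; exact on printable ASCII plus the six umlauted vowels (the only characters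
-- occurring here). A ports it recursively (pyTitle), B as a fold (titleB).

def umlautLowerChars : List Char := ['ä', 'ë', 'ï', 'ö', 'ü', 'ÿ']
def umlautUpperChars : List Char := ['Ä', 'Ë', 'Ï', 'Ö', 'Ü', 'Ÿ']

def casedExt (c : Char) : Bool :=
  PySem.Chars.isalpha c || umlautLowerChars.contains c || umlautUpperChars.contains c

def upperExt (c : Char) : Char :=
  match c with
  | 'ä' => 'Ä' | 'ë' => 'Ë' | 'ï' => 'Ï' | 'ö' => 'Ö' | 'ü' => 'Ü' | 'ÿ' => 'Ÿ'
  | _ => PySem.Chars.upperChar c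

def lowerExt (c : Char) : Char :=
  match c with
  | 'Ä' => 'ä' | 'Ë' => 'ë' | 'Ï' => 'ï' | 'Ö' => 'ö' | 'Ü' => 'ü' | 'Ÿ' => 'ÿ'
  | _ => PySem.Chars.lowerChar c

-- ===== PORT A =====
-- A's vowels dict literal
def vowelsDict : PySem.Dict Char Char :=
  PySem.Dict.ofList [('a', 'ä'), ('e', 'ë'), ('i', 'ï'), ('o', 'ö'), ('u', 'ü'), ('y', 'ÿ')]

def pyTitle : List Char → Bool → List Char
  | [], _ => []
  | c :: cs, prev =>
    (if casedExt c then (if prev then lowerExt c else upperExt c) else c) :: pyTitle cs (casedExt c)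

-- A's for-loop: state (output, translate); output accumulated by append
def umlautLoopA : List Char → List Char → Bool → List Char
  | [], out, _ => out
  | c :: cs, out, tr =>
    if tr && vowelsDict.contains c then umlautLoopA cs (out ++ [vowelsDict.getD c c]) false
    else if c = ' ' then umlautLoopA cs (out ++ [' ']) true
    else umlautLoopA cs (out ++ [c]) tr

def umlauted (name : String) : String :=
  -- " ".join(name.lower()[::-1].split()[::-1])  (s[::-1] is reverse)
  let backwards :=
    PySem.Chars.join [' '] ((PySem.Chars.split₀ (PySem.Chars.lower name.toList).reverse).reverse)
  String.ofList (pyTitle (umlautLoopA backwards [] true) false)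

-- ===== PORT B =====
-- B's VOWELS dict literal
def vowelsB : PySem.Dict Char Char :=
  PySem.Dict.ofList [('a', 'ä'), ('e', 'ë'), ('i', 'ï'), ('o', 'ö'), ('u', 'ü'), ('y', 'ÿ')]

-- _um_last: if any character further on is a vowel, keep this one and recurse;
-- otherwise this position carries the last vowel, if any: VOWELS.get(c, c)
def umLastB : List Char → List Char
  | [] => []
  | c :: rest =>
    if rest.any (fun ch => vowelsB.contains ch) then c :: umLastB rest
    else vowelsB.getD c c :: rest

-- ''.join(...).title() ported as a left fold carrying (output so far, previous cased?)
def titleB (cs : List Char) : List Char :=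
  (cs.foldl
    (fun (st : List Char × Bool) c =>
      (st.1 ++ [if casedExt c then (if st.2 then lowerExt c else upperExt c) else c], casedExt c))
    ([], false)).1

def umlauted_alt (name : String) : String :=
  let pieces :=
    (PySem.Chars.split₀ (PySem.Chars.lower name.toList)).map (fun w => (umLastB w).reverse)
  String.ofList (titleB (PySem.Chars.join [' '] pieces))

-- ===== PRECONDITION & SPEC =====
def Spec_umlauted (name : String) (out : String) : Prop := out = umlauted_alt name
instance (name : String) (out : String) : Decidable (Spec_umlauted name out) := by
  unfold Spec_umlauted; infer_instance

-- ===== CLAIM (what is proved, stated in full; the proofs are below) =====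
def Claim_equal_umlauted : Prop :=
  ∀ (name : String), Dom_umlauted name → Spec_umlauted name (umlauted name)

-- ===== LEMMAS AND PROOFS =====

theorem vowelsB_eq : vowelsB = vowelsDict := rfl

-- proof-only bridge: umlaut the FIRST vowel of a list (what A's flag-pass does inside a word)
def firstVowelUmB : List Char → List Char
  | [] => []
  | c :: cs =>
    if vowelsDict.contains c then vowelsDict.getD c c :: cs else c :: firstVowelUmB cs

theorem modifyLast_cons_ne {α : Type} (f : α → α) (h : α) (t : List α) (ht : t ≠ []) :
    (h :: t).modifyLast f = h :: t.modifyLast f := by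
  simpa using List.modifyLast_append_of_right_ne_nil f [h] t ht

theorem modifyLast_single {α : Type} (f : α → α) (x : α) :
    ([x] : List α).modifyLast f = [f x] := by
  simpa using List.modifyLast_concat f x []

theorem splitOnP_snoc_not {α : Type} (p : α → Bool) (c : α) (hc : ¬ p c = true) :
    ∀ (xs : List α), (xs ++ [c]).splitOnP p = (xs.splitOnP p).modifyLast (· ++ [c]) := by
  intro xs
  induction xs with
  | nil => simp [hc, modifyLast_single]
  | cons y ys ih =>
    by_cases hy : p y = true
    · have hne := List.splitOnP_ne_nil p ys
      simp only [List.cons_append, List.splitOnP_cons, hy, if_pos, ih]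
      rw [modifyLast_cons_ne _ _ _ hne]
    · obtain ⟨h, t, ht⟩ := List.exists_cons_of_ne_nil (List.splitOnP_ne_nil p ys)
      simp only [List.cons_append, List.splitOnP_cons, hy, ih, ht]
      cases t with
      | nil => simp [modifyLast_single]
      | cons a t =>
        simp only [Bool.false_eq_true, if_false]
        rw [modifyLast_cons_ne _ h (a :: t) (by simp), List.modifyHead_cons, List.modifyHead_cons,
          modifyLast_cons_ne _ (y :: h) (a :: t) (by simp)]

theorem splitOnP_reverse {α : Type} (p : α → Bool) :
    ∀ (s : List α), s.reverse.splitOnP p = ((s.splitOnP p).map List.reverse).reverse := by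
  intro s
  induction s with
  | nil => simp
  | cons c s ih =>
    by_cases hc : p c = true
    · have h2 := List.splitOnP_append_cons p s.reverse [] c hc
      simp only [List.reverse_cons, h2, List.splitOnP_nil, List.splitOnP_cons, hc, if_pos, ih]
      simp
    · obtain ⟨h, t, ht⟩ := List.exists_cons_of_ne_nil (List.splitOnP_ne_nil p s)
      rw [List.reverse_cons, splitOnP_snoc_not p c hc, ih, ht]
      simp only [List.splitOnP_cons, hc, ht, List.modifyHead_cons, List.map_cons,
        List.reverse_cons]
      rw [List.modifyLast_concat]
      simp

theorem splitOnP_no_sep {α : Type} (p : α → Bool) :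
    ∀ (s : List α) (w : List α), w ∈ s.splitOnP p → ∀ c ∈ w, p c = false := by
  intro s
  induction s with
  | nil => intro w hw c hc; simp at hw; subst hw; simp at hc
  | cons a s ih =>
    intro w hw c hc
    by_cases ha : p a = true
    · rw [List.splitOnP_cons, if_pos ha] at hw
      rcases List.mem_cons.mp hw with hw | hw
      · subst hw; simp at hc
      · exact ih w hw c hc
    · obtain ⟨h, t, ht⟩ := List.exists_cons_of_ne_nil (List.splitOnP_ne_nil p s)
      rw [List.splitOnP_cons, if_neg ha, ht, List.modifyHead_cons] at hw
      rcases List.mem_cons.mp hw with hw | hw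
      · subst hw
        rcases List.mem_cons.mp hc with hc | hc
        · subst hc; simpa using ha
        · exact ih h (ht ▸ List.mem_cons_self) c hc
      · exact ih w (ht ▸ List.mem_cons_of_mem _ hw) c hc

def pySplitSpec (s : List Char) : List (List Char) :=
  (s.splitOnP PySem.Chars.isspace).filter (fun w => !w.isEmpty)

theorem split0_go_eq (s : List Char) :
    ∀ (cur : List Char) (acc : List (List Char)),
      (∀ c ∈ cur, PySem.Chars.isspace c = false) →
      PySem.Chars.split₀.go s cur acc = acc.reverse ++ pySplitSpec (cur.reverse ++ s) := by
  induction s with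
  | nil =>
    intro cur acc hcur
    rw [PySem.Chars.split₀.go]
    by_cases hc0 : cur = []
    · subst hc0; simp [pySplitSpec]
    · have hemp : cur.isEmpty = false := by simp [List.isEmpty_iff, hc0]
      have hsingle : cur.reverse.splitOnP PySem.Chars.isspace = [cur.reverse] :=
        List.splitOnP_eq_single _ _ (fun x hx => by simp [hcur x (List.mem_reverse.mp hx)])
      simp [hemp, pySplitSpec, hsingle, hc0]
  | cons c rest ih =>
    intro cur acc hcur
    rw [PySem.Chars.split₀.go]
    by_cases hsp : PySem.Chars.isspace c = true
    · by_cases hc0 : cur = []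
      · subst hc0
        simp only [hsp, if_pos, List.isEmpty_nil]
        rw [ih [] acc (by simp)]
        simp [pySplitSpec, List.splitOnP_cons, hsp]
      · have hemp : cur.isEmpty = false := by simp [List.isEmpty_iff, hc0]
        simp only [hsp, if_pos, hemp, Bool.false_eq_true, if_false]
        rw [ih [] (cur.reverse :: acc) (by simp)]
        have hfirst := List.splitOnP_first PySem.Chars.isspace cur.reverse
          (fun x hx => by simp [hcur x (List.mem_reverse.mp hx)]) c hsp rest
        simp [pySplitSpec, hfirst, hc0]
    · have hcc : ∀ x ∈ c :: cur, PySem.Chars.isspace x = false := by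
        intro x hx
        rcases List.mem_cons.mp hx with h | h
        · subst h; simpa using hsp
        · exact hcur x h
      simp only [hsp, Bool.false_eq_true, if_false]
      rw [ih (c :: cur) acc hcc]
      simp [pySplitSpec, List.append_assoc]

theorem split0_eq_spec (s : List Char) : PySem.Chars.split₀ s = pySplitSpec s := by
  rw [PySem.Chars.split₀]
  simpa using split0_go_eq s [] [] (by simp)

theorem split0_reverse (l : List Char) :
    (PySem.Chars.split₀ l.reverse).reverse = (PySem.Chars.split₀ l).map List.reverse := by
  rw [split0_eq_spec, split0_eq_spec]
  unfold pySplitSpec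
  rw [splitOnP_reverse, List.filter_reverse, List.reverse_reverse, List.filter_map]
  congr 1
  apply List.filter_congr
  intro w _
  simp

theorem split0_no_space (l : List Char) :
    ∀ w ∈ PySem.Chars.split₀ l, ∀ c ∈ w, PySem.Chars.isspace c = false := by
  intro w hw c hc
  rw [split0_eq_spec] at hw
  exact splitOnP_no_sep _ l w (List.mem_of_mem_filter hw) c hc

theorem loopA_out : ∀ (cs out : List Char) (tr : Bool),
    umlautLoopA cs out tr = out ++ umlautLoopA cs [] tr := by
  intro cs
  induction cs with
  | nil => intro out tr; simp [umlautLoopA]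
  | cons c cs ih =>
    intro out tr
    rw [umlautLoopA, umlautLoopA]
    split_ifs with h1 h2
    · rw [ih (out ++ [vowelsDict.getD c c]), ih ([] ++ [vowelsDict.getD c c])]; simp
    · rw [ih (out ++ [' ']), ih ([] ++ [' '])]; simp
    · rw [ih (out ++ [c]), ih ([] ++ [c])]; simp

theorem loopA_false : ∀ (w cs : List Char), (' ' ∉ w) →
    umlautLoopA (w ++ cs) [] false = w ++ umlautLoopA cs [] false := by
  intro w
  induction w with
  | nil => simp
  | cons c w ih =>
    intro cs hsp
    rw [List.cons_append, umlautLoopA]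
    have hc : ¬ c = ' ' := fun h => hsp (h ▸ List.mem_cons_self)
    simp only [Bool.false_and, Bool.false_eq_true, if_false, hc]
    rw [loopA_out, ih cs (fun h => hsp (List.mem_cons_of_mem _ h))]
    simp

theorem loopA_false_nil (w : List Char) (h : ' ' ∉ w) :
    umlautLoopA w [] false = w := by
  simpa [umlautLoopA] using loopA_false w [] h

theorem contains_space_false : vowelsDict.contains ' ' = false := by decide

theorem loopA_true_end : ∀ (w : List Char), (' ' ∉ w) →
    umlautLoopA w [] true = firstVowelUmB w := by
  intro w
  induction w with
  | nil => simp [umlautLoopA, firstVowelUmB]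
  | cons c w ih =>
    intro hsp
    have hc : ¬ c = ' ' := fun h => hsp (h ▸ List.mem_cons_self)
    rw [umlautLoopA, firstVowelUmB]
    by_cases hv : vowelsDict.contains c = true
    · simp only [hv, Bool.true_and, if_pos]
      rw [loopA_out, loopA_false_nil w (fun h => hsp (List.mem_cons_of_mem _ h))]
      simp
    · simp only [hv, Bool.true_and, Bool.false_eq_true, if_false]
      rw [if_neg hc, loopA_out, ih (fun h => hsp (List.mem_cons_of_mem _ h))]
      simp

theorem loopA_space_false (cs : List Char) :
    umlautLoopA (' ' :: cs) [] false = ' ' :: umlautLoopA cs [] true := by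
  rw [umlautLoopA]
  simp only [Bool.false_and, Bool.false_eq_true, if_false, if_pos rfl]
  rw [loopA_out]
  simp

theorem loopA_true_sep : ∀ (w cs : List Char), (' ' ∉ w) →
    umlautLoopA (w ++ ' ' :: cs) [] true =
      firstVowelUmB w ++ ' ' :: umlautLoopA cs [] true := by
  intro w
  induction w with
  | nil =>
    intro cs _
    rw [List.nil_append, firstVowelUmB, umlautLoopA]
    simp only [contains_space_false, Bool.and_false, Bool.false_eq_true, if_false, if_pos rfl]
    rw [loopA_out]
    simp
  | cons c w ih =>
    intro cs hsp
    have hc : ¬ c = ' ' := fun h => hsp (h ▸ List.mem_cons_self)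
    have hw : ' ' ∉ w := fun h => hsp (List.mem_cons_of_mem _ h)
    rw [List.cons_append, umlautLoopA, firstVowelUmB]
    by_cases hv : vowelsDict.contains c = true
    · simp only [hv, Bool.true_and, if_pos]
      rw [loopA_out, loopA_false w (' ' :: cs) hw, loopA_space_false]
      simp
    · simp only [hv, Bool.true_and, Bool.false_eq_true, if_false]
      rw [if_neg hc, loopA_out, ih cs hw]
      simp

theorem loop_join : ∀ (ws : List (List Char)), (∀ w ∈ ws, ' ' ∉ w) →
    umlautLoopA (PySem.Chars.join [' '] ws) [] true =
      PySem.Chars.join [' '] (ws.map firstVowelUmB) := by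
  intro ws
  induction ws with
  | nil => intro _; simp [PySem.Chars.join_nil, umlautLoopA]
  | cons a t ih =>
    intro h
    cases t with
    | nil =>
      simp only [List.map_cons, List.map_nil, PySem.Chars.join_singleton]
      exact loopA_true_end a (h a List.mem_cons_self)
    | cons b t =>
      rw [PySem.Chars.join_cons_cons, List.map_cons, List.map_cons,
        PySem.Chars.join_cons_cons (p := firstVowelUmB a), ← List.map_cons]
      rw [List.append_assoc, List.singleton_append, loopA_true_sep a _ (h a List.mem_cons_self)]
      rw [ih (fun w hw => h w (List.mem_cons_of_mem _ hw))]
      simp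

-- B-side: the fold-based title equals the recursive one
theorem titleB_go : ∀ (cs acc : List Char) (prev : Bool),
    (cs.foldl
      (fun (st : List Char × Bool) c =>
        (st.1 ++ [if casedExt c then (if st.2 then lowerExt c else upperExt c) else c],
         casedExt c))
      (acc, prev)).1 = acc ++ pyTitle cs prev := by
  intro cs
  induction cs with
  | nil => intro acc prev; simp [pyTitle]
  | cons c cs ih =>
    intro acc prev
    rw [List.foldl_cons, ih, pyTitle]
    simp

theorem titleB_eq (cs : List Char) : titleB cs = pyTitle cs false := by
  unfold titleB
  simpa using titleB_go cs [] false

-- first-vowel over an append: whichever side holds the first vowel gets changed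
theorem fv_append (xs ys : List Char) :
    firstVowelUmB (xs ++ ys) =
      if xs.any (fun ch => vowelsDict.contains ch) then firstVowelUmB xs ++ ys
      else xs ++ firstVowelUmB ys := by
  induction xs with
  | nil => simp
  | cons c xs ih =>
    by_cases hc : vowelsDict.contains c = true
    · simp [firstVowelUmB, hc]
    · simp [firstVowelUmB, hc, ih]
      split_ifs <;> simp

theorem getD_self_of_not_contains (c : Char) (h : ¬ vowelsDict.contains c = true) :
    vowelsDict.getD c c = c :=
  PySem.Dict.getD_of_not_contains vowelsDict c (by simpa using h)

-- the bridge: first vowel of the reversed word = last vowel of the word, reversed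
theorem fv_reverse : ∀ (w : List Char),
    firstVowelUmB w.reverse = (umLastB w).reverse := by
  intro w
  induction w with
  | nil => simp [firstVowelUmB, umLastB]
  | cons c rest ih =>
    rw [List.reverse_cons, fv_append, umLastB, vowelsB_eq]
    by_cases h : rest.any (fun ch => vowelsDict.contains ch) = true
    · have hr : rest.reverse.any (fun ch => vowelsDict.contains ch) = true := by
        simpa [List.any_reverse] using h
      simp [hr, h, ih]
    · have hr : rest.reverse.any (fun ch => vowelsDict.contains ch) = false := by
        simpa [List.any_reverse] using h
      have hfv1 : firstVowelUmB [c] = [vowelsDict.getD c c] := by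
        by_cases hc : vowelsDict.contains c = true
        · simp [firstVowelUmB, hc]
        · simp [firstVowelUmB, hc, getD_self_of_not_contains c hc]
      simp [hr, h, hfv1]

theorem main_eq (name : String) : umlauted name = umlauted_alt name := by
  unfold umlauted umlauted_alt
  have hns : ∀ w ∈ (PySem.Chars.split₀ (PySem.Chars.lower name.toList)).map List.reverse,
      ' ' ∉ w := by
    intro w hw hsp
    obtain ⟨v, hv, rfl⟩ := List.mem_map.mp hw
    have h1 := split0_no_space _ v hv ' ' (List.mem_reverse.mp hsp)
    have h2 : PySem.Chars.isspace ' ' = true := by decide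
    rw [h1] at h2
    exact Bool.false_ne_true h2
  simp only []
  have hm : ∀ (l : List (List Char)),
      l.map (firstVowelUmB ∘ List.reverse) = l.map (fun w => (umLastB w).reverse) := by
    intro l
    apply List.map_congr_left
    intro w _
    show firstVowelUmB w.reverse = (umLastB w).reverse
    exact fv_reverse w
  rw [split0_reverse, loop_join _ hns, titleB_eq, List.map_map, hm]

-- ===== VERDICT (by name: the statement is the Claim_ definition above) =====
theorem umlauted_spec : Claim_equal_umlauted := by
  intro name _
  unfold Spec_umlauted
  exact main_eq name
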